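-- pv_equiv track=rewrite | github.com/khelina/T-cell-lineages-tracking | DeepKymoTracker (full version)/functions.py | create_intensity_dictionary
-- ===== SOURCE A (Python) =====
-- import itertools
-- import itertools
--
-- def create_intensity_dictionary(n_cells):
--      cell_ids =[ii for ii in range(n_cells)]
--      all_combinations =[]
--      for i in range(1,n_cells+1):
--           combinations = list(itertools.combinations(cell_ids, i))
--           all_combinations+=combinations
--
--      int_dictionary ={}
--      for k in range(len(all_combinations)):
--          combo =all_combinations[k]
--          summ=0
--          for kk in range(len(combo)):
--             summ+=2**combo[kk]
--          int_dictionary[str(summ)]=list(combo) # summ=1,2,3,4,5,...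
--      return int_dictionary
-- ===== SOURCE B (Python) =====
-- def create_intensity_dictionary(n_cells):
--     # Build subsets layer by layer: each size-(s+1) subset extends a size-s subset
--     # with a strictly larger index; the integer key grows incrementally by 2**i,
--     # so there is no itertools call and no per-subset re-summation of powers.
--     int_dictionary = {}
--     layer = [(0, [])]
--     for _ in range(n_cells):
--         new_layer = []
--         for mask, combo in layer:
--             start = combo[-1] + 1 if combo else 0
--             for i in range(start, n_cells):
--                 new_layer.append((mask + 2 ** i, combo + [i]))
--         layer = new_layer
--         for mask, combo in layer:
--             int_dictionary[str(mask)] = combo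
--     return int_dictionary
-- ===== Notes on version B (the rewrite author's own statement) =====
-- stated objective: alternative
-- what changed: B drops itertools and the per-subset re-summation of powers: it grows subsets layer by layer (each larger subset extends a smaller one with a strictly larger index) and carries each subset's integer key incrementally, adding the power of two of the newly appended index, inserting each layer into the dictionary as it is built.
import Mathlib
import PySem

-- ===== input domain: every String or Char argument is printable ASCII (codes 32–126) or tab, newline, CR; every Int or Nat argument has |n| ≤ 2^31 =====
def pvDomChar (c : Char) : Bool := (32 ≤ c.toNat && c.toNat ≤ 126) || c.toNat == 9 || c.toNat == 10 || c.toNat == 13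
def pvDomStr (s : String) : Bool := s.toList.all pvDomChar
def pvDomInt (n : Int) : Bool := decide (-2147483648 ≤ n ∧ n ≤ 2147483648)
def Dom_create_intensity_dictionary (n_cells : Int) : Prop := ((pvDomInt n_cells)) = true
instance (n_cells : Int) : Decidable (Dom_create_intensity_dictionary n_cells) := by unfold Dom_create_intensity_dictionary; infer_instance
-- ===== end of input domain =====

-- B replaces A's itertools-and-resummation subset enumeration by a layer-by-layer
-- extension that carries each subset's integer key incrementally (objective: alternative).

-- ===== PORT A =====
-- 2**e for the nonnegative exponents this program produces (every exponent is an
-- element of range(n_cells), hence ≥ 0; exact there).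
def pvPow2 (e : Int) : Int := 2 ^ e.toNat

def create_intensity_dictionary (n_cells : Int) : List (String × List Int) :=
  let cell_ids := PySem.List.pyRange 0 n_cells 1
  let all_combinations :=
    (PySem.List.pyRange 1 (n_cells + 1) 1).foldl
      (fun acc i => acc ++ PySem.List.combinations cell_ids i.toNat) []
  let d :=
    (PySem.List.pyRange 0 (PySem.List.len all_combinations) 1).foldl
      (fun (d : PySem.Dict String (List Int)) k =>
        let combo := PySem.List.pyGetD all_combinations k []
        let summ :=
          (PySem.List.pyRange 0 (PySem.List.len combo) 1).foldl
            (fun s kk => s + pvPow2 (PySem.List.pyGetD combo kk 0)) 0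
        d.insert (PySem.Int.toStr summ) combo)
      PySem.Dict.empty
  d.items

-- ===== PORT B =====
-- one iteration of B's main loop: extend every (mask, combo) of the current layer,
-- then record the new layer in the dictionary
def pvBodyB (n_cells : Int) (st : List (Int × List Int) × PySem.Dict String (List Int)) :
    List (Int × List Int) × PySem.Dict String (List Int) :=
  let layer :=
    st.1.foldl
      (fun nl mc =>
        let start := if mc.2 = [] then 0 else PySem.List.pyGetD mc.2 (-1) 0 + 1
        (PySem.List.pyRange start n_cells 1).foldl
          (fun nl2 i => nl2 ++ [(mc.1 + pvPow2 i, mc.2 ++ [i])]) nl)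
      []
  let d := layer.foldl (fun d mc => d.insert (PySem.Int.toStr mc.1) mc.2) st.2
  (layer, d)

def create_intensity_dictionary_alt (n_cells : Int) : List (String × List Int) :=
  let st :=
    (PySem.List.pyRange 0 n_cells 1).foldl
      (fun st _ => pvBodyB n_cells st)
      ([(0, ([] : List Int))], PySem.Dict.empty)
  st.2.items

-- ===== PRECONDITION & SPEC =====
def Spec_create_intensity_dictionary (n_cells : Int) (out : List (String × List Int)) : Prop := out = create_intensity_dictionary_alt n_cells
instance (n_cells : Int) (out : List (String × List Int)) : Decidable (Spec_create_intensity_dictionary n_cells out) := by unfold Spec_create_intensity_dictionary; infer_instance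

-- ===== CLAIM (what is proved, stated in full; the proofs are below) =====
def Claim_equal_create_intensity_dictionary : Prop := ∀ (n_cells : Int), Dom_create_intensity_dictionary n_cells → Spec_create_intensity_dictionary n_cells (create_intensity_dictionary n_cells)

-- ===== LEMMAS AND PROOFS =====

-- the integer key of a subset, as A computes it
def pvSumm (c : List Int) : Int := c.foldl (fun s x => s + pvPow2 x) 0

def pvTag (c : List Int) : Int × List Int := (pvSumm c, c)

def pvIns (d : PySem.Dict String (List Int)) (c : List Int) : PySem.Dict String (List Int) :=
  d.insert (PySem.Int.toStr (pvSumm c)) c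

-- B's extension of one subset, untagged, with base b for the empty subset
def pvExt (n b : Int) (c : List Int) : List (List Int) :=
  (PySem.List.pyRange (if c = [] then b else PySem.List.pyGetD c (-1) 0 + 1) n 1).map
    (fun i => c ++ [i])

lemma pv_lastD_cons (x : Int) (c : List Int) :
    PySem.List.pyGetD (x :: c) (-1) 0 = if c = [] then x else PySem.List.pyGetD c (-1) 0 := by
  cases c with
  | nil => rfl
  | cons y t => simp [PySem.List.pyGetD, PySem.List.pyGet?, PySem.List.pyIdx?]; rfl

lemma pvSumm_append (c : List Int) (i : Int) : pvSumm (c ++ [i]) = pvSumm c + pvPow2 i := by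
  simp [pvSumm]

lemma pvExt_cons (n b x : Int) (c : List Int) :
    pvExt n b (x :: c) = (pvExt n (x + 1) c).map (x :: ·) := by
  by_cases hc : c = [] <;>
    simp [pvExt, pv_lastD_cons, hc, List.map_map, Function.comp]


lemma pvExt_base_irrel (n b b' : Int) (c : List Int) (hc : c ≠ []) :
    pvExt n b c = pvExt n b' c := by
  simp [pvExt, hc]

-- the heart: extending every size-s combination gives exactly the size-(s+1) combinations
lemma pv_combos_ext (n : Int) :
    ∀ (s : Nat) (b : Int),
      (PySem.List.combinations (PySem.List.pyRange b n 1) s).flatMap (pvExt n b)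
        = PySem.List.combinations (PySem.List.pyRange b n 1) (s + 1) := by
  intro s
  induction s with
  | zero =>
    intro b
    rw [PySem.List.combinations_zero, PySem.List.combinations_one]
    simp [pvExt]
  | succ s ih =>
    have aux : ∀ (k : Nat) (b : Int), (n - b).toNat ≤ k →
        (PySem.List.combinations (PySem.List.pyRange b n 1) (s + 1)).flatMap (pvExt n b)
          = PySem.List.combinations (PySem.List.pyRange b n 1) (s + 2) := by
      intro k
      induction k with
      | zero =>
        intro b hb
        rw [PySem.List.pyRange_one_eq_nil (by omega), PySem.List.combinations_nil_succ,
            PySem.List.combinations_nil_succ]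
        rfl
      | succ k ihk =>
        intro b hb
        by_cases hlt : b < n
        · rw [PySem.List.pyRange_one_cons hlt, PySem.List.combinations_cons_succ,
              List.flatMap_append]
          have h1 : ((PySem.List.combinations (PySem.List.pyRange (b + 1) n 1) s).map (b :: ·)).flatMap (pvExt n b)
              = (PySem.List.combinations (PySem.List.pyRange (b + 1) n 1) (s + 1)).map (b :: ·) := by
            rw [List.flatMap_map]
            rw [show (fun c => pvExt n b (b :: c)) = fun c => (pvExt n (b + 1) c).map (b :: ·) by
                  funext c; rw [pvExt_cons]]
            rw [← List.map_flatMap, ih (b + 1)]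
          have h2 : (PySem.List.combinations (PySem.List.pyRange (b + 1) n 1) (s + 1)).flatMap (pvExt n b)
              = PySem.List.combinations (PySem.List.pyRange (b + 1) n 1) (s + 2) := by
            rw [List.flatMap_congr (g := pvExt n (b + 1))
                  (by intro c hc
                      have hlen := PySem.List.length_of_mem_combinations hc
                      have hne : c ≠ [] := by intro h; simp [h] at hlen
                      exact pvExt_base_irrel n b (b + 1) c hne)]
            exact ihk (b + 1) (by omega)
          rw [h1, h2, PySem.List.combinations_cons_succ]
        · rw [PySem.List.pyRange_one_eq_nil (by omega), PySem.List.combinations_nil_succ,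
              PySem.List.combinations_nil_succ]
          rfl
    intro b
    exact aux (n - b).toNat b le_rfl


-- B's loop body, normalised
lemma pvBodyB_eq (n : Int) (L : List (List Int)) (d : PySem.Dict String (List Int)) :
    pvBodyB n (L.map pvTag, d)
      = ((L.flatMap (pvExt n 0)).map pvTag,
         (L.flatMap (pvExt n 0)).foldl pvIns d) := by
  simp only [pvBodyB]
  have hlayer : (L.map pvTag).foldl
      (fun nl mc =>
        (PySem.List.pyRange (if mc.2 = [] then 0 else PySem.List.pyGetD mc.2 (-1) 0 + 1) n 1).foldl
          (fun nl2 i => nl2 ++ [(mc.1 + pvPow2 i, mc.2 ++ [i])]) nl) []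
      = (L.flatMap (pvExt n 0)).map pvTag := by
    rw [PySem.List.foldl_congr_mem (L.map pvTag) _
          (fun (nl : List (Int × List Int)) (mc : Int × List Int) => nl ++
            (PySem.List.pyRange (if mc.2 = [] then 0 else PySem.List.pyGetD mc.2 (-1) 0 + 1) n 1).map
              (fun i => (mc.1 + pvPow2 i, mc.2 ++ [i]))) []
          (by intro acc mc _
              rw [PySem.List.foldl_append_singleton_eq_map])]
    rw [PySem.List.foldl_append_eq_flatMap, List.nil_append, List.flatMap_map, List.map_flatMap]
    congr 1
    funext c
    simp [pvExt, pvTag, List.map_map, Function.comp, pvSumm_append]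
  rw [hlayer, List.foldl_map]
  rfl


-- the state after m iterations of B's loop
lemma pv_inv (n : Int) :
    ∀ (m : Nat),
      (pvBodyB n)^[m] ([(0, ([] : List Int))], PySem.Dict.empty)
        = ((PySem.List.combinations (PySem.List.pyRange 0 n 1) m).map pvTag,
           (((List.range m).map
              (fun s => PySem.List.combinations (PySem.List.pyRange 0 n 1) (s + 1))).flatten).foldl
             pvIns PySem.Dict.empty) := by
  intro m
  induction m with
  | zero => simp [PySem.List.combinations_zero, pvTag, pvSumm]
  | succ m ih =>
    rw [Function.iterate_succ_apply', ih, pvBodyB_eq, pv_combos_ext n m 0]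
    rw [List.range_succ]
    simp [List.foldl_append]


lemma pv_foldl_ignore_iterate {α β : Type} (g : α → α) :
    ∀ (l : List β) (st : α), l.foldl (fun st _ => g st) st = g^[l.length] st := by
  intro l
  induction l with
  | nil => intro st; rfl
  | cons x t ih =>
    intro st
    simp [List.foldl_cons, ih, Function.iterate_succ_apply]

lemma pv_A_eq (n : Int) :
    create_intensity_dictionary n
      = (((PySem.List.pyRange 1 (n + 1) 1).flatMap
            (fun i => PySem.List.combinations (PySem.List.pyRange 0 n 1) i.toNat)).foldl
           pvIns PySem.Dict.empty).items := by
  simp only [create_intensity_dictionary]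
  rw [PySem.List.foldl_append_eq_flatMap, List.nil_append]
  rw [PySem.List.foldl_pyRange_zero_pyGetD
        (d := ([] : List Int))
        (f := fun (d : PySem.Dict String (List Int)) (combo : List Int) =>
          d.insert (PySem.Int.toStr
            ((PySem.List.pyRange 0 (PySem.List.len combo) 1).foldl
              (fun s kk => s + pvPow2 (PySem.List.pyGetD combo kk 0)) 0)) combo)]
  congr 1
  apply PySem.List.foldl_congr_mem
  intro d c _
  rw [PySem.List.foldl_pyRange_zero_pyGetD (d := (0 : Int)) (f := fun s x => s + pvPow2 x)]
  rfl


lemma pv_flatten_range_eq (n : Int) :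
    (((List.range n.toNat).map
        (fun s => PySem.List.combinations (PySem.List.pyRange 0 n 1) (s + 1))).flatten)
      = (PySem.List.pyRange 1 (n + 1) 1).flatMap
          (fun i => PySem.List.combinations (PySem.List.pyRange 0 n 1) i.toNat) := by
  have h1 : PySem.List.pyRange 1 (n + 1) 1
      = (List.range n.toNat).map (fun k : Nat => (1 : Int) + k) := by
    rw [PySem.List.pyRange_one, show (n + 1 - 1 : Int) = n by ring]
  rw [h1, List.flatMap_map, List.flatMap_def]
  congr 1
  apply List.map_congr_left
  intro s _
  congr 1
  omega


-- ===== VERDICT (by name: the statement is the Claim_ definition above) =====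
theorem create_intensity_dictionary_spec : Claim_equal_create_intensity_dictionary := by
  intro n _
  show create_intensity_dictionary n = create_intensity_dictionary_alt n
  rw [pv_A_eq]
  simp only [create_intensity_dictionary_alt]
  rw [pv_foldl_ignore_iterate (pvBodyB n) (PySem.List.pyRange 0 n 1)]
  rw [show (PySem.List.pyRange 0 n 1).length = n.toNat by
        simp [PySem.List.length_pyRange_one]]
  rw [pv_inv n n.toNat, pv_flatten_range_eq n]
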